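-- pv_equiv track=rewrite | github.com/Ilis/checkio | Polygon/homecoming.py | home_coming
-- ===== SOURCE A (Python) =====
-- from typing import List
-- from collections import Counter
--
-- def home_coming(souvenirs: List[int], s: int) -> int:
--     def count_items(items):
--         counter = Counter(items)
--         allowed = [item for item in items if counter[item] <= s]
--         return len(allowed)
--
--     n = len(souvenirs)
--     return max(count_items(souvenirs[a:b + 1])
--                for a in range(n)
--                for b in range(a, n))
-- ===== SOURCE B (Python) =====
-- def home_coming(souvenirs, s):
--     # O(n^2): for each left end, extend the right end one item at a time,
--     # maintaining the count of items that still appear <= s times.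
--     best = 0
--     n = len(souvenirs)
--     for a in range(n):
--         counts = {}
--         allowed = 0
--         for x in souvenirs[a:]:
--             c = counts.get(x, 0) + 1
--             counts[x] = c
--             if c <= s:
--                 allowed += 1
--             elif c == s + 1:
--                 allowed -= s
--             if allowed > best:
--                 best = allowed
--     return best
-- ===== Notes on version B (the rewrite author's own statement) =====
-- stated objective: faster
-- what changed: Replaces the O(n^3) scan (recounting every subarray from scratch with a fresh Counter) by an O(n^2) incremental scan: for each left end the right end is extended one item at a time while the number of still-allowed items is updated in O(1) per step.
import Mathlib
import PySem

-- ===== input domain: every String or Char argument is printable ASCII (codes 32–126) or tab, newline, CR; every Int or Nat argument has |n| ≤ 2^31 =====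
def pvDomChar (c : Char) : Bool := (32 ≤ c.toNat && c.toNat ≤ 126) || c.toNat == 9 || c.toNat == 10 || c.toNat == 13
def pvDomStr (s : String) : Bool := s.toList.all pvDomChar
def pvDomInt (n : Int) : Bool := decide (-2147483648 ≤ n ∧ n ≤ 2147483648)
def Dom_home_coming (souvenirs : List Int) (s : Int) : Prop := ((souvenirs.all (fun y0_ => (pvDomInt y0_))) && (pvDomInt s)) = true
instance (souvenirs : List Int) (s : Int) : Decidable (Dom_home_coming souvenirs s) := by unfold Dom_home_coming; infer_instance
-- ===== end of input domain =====

-- B replaces A's recount-every-subarray O(n^3) scan by an O(n^2) incremental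
-- per-left-end scan; proved to return the same value on every nonempty list.

-- ===== PORT A =====
-- count_items: Counter over the slice, then keep items occurring ≤ s times
def countItemsA (items : List Int) (s : Int) : Int :=
  let counter := PySem.Dict.counter items
  let allowed := items.filter (fun item => counter.getD item 0 ≤ s)
  (allowed.length : Int)

def home_coming (souvenirs : List Int) (s : Int) : Int :=
  let n : Int := souvenirs.length
  let vals := (PySem.List.pyRange 0 n 1).flatMap (fun a =>
      (PySem.List.pyRange a n 1).map (fun b =>
        countItemsA (PySem.List.slice souvenirs (some a) (some (b + 1))) s))
  match PySem.List.max? vals id with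
  | some m => m
  | none => 0   -- unreachable under Pre_ (Python raises ValueError on empty)

-- ===== PORT B =====
-- one step of B's inner loop: state = (counts dict, allowed, best)
def innerStepB (s : Int) (st : PySem.Dict Int Int × Int × Int) (x : Int) :
    PySem.Dict Int Int × Int × Int :=
  let c := st.1.getD x 0 + 1
  let counts := st.1.insert x c
  let allowed := if c ≤ s then st.2.1 + 1 else if c = s + 1 then st.2.1 - s else st.2.1
  let best := if allowed > st.2.2 then allowed else st.2.2
  (counts, allowed, best)

def home_coming_alt (souvenirs : List Int) (s : Int) : Int :=
  let n : Int := souvenirs.length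
  (PySem.List.pyRange 0 n 1).foldl (fun best a =>
      ((PySem.List.slice souvenirs (some a) none).foldl (innerStepB s)
        (PySem.Dict.empty, 0, best)).2.2) 0

-- ===== PRECONDITION & SPEC =====
-- Pre_ excludes only the empty list, on which A raises ValueError (max of an empty generator).
def Pre_home_coming (souvenirs : List Int) (s : Int) : Prop := souvenirs ≠ []
instance (souvenirs : List Int) (s : Int) : Decidable (Pre_home_coming souvenirs s) := by
  unfold Pre_home_coming; infer_instance
def pvWitness_home_coming : List Int × Int := ([1, 2, 1], 1)

def Spec_home_coming (souvenirs : List Int) (s : Int) (out : Int) : Prop := out = home_coming_alt souvenirs s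
instance (souvenirs : List Int) (s : Int) (out : Int) : Decidable (Spec_home_coming souvenirs s out) := by unfold Spec_home_coming; infer_instance

-- ===== CLAIM (what is proved, stated in full; the proofs are below) =====
def Claim_equal_home_coming : Prop := ∀ (souvenirs : List Int) (s : Int), Dom_home_coming souvenirs s → Pre_home_coming souvenirs s → Spec_home_coming souvenirs s (home_coming souvenirs s)

-- ===== LEMMAS AND PROOFS =====

-- the mathematical value both sides compute per subarray
def cnt (s : Int) (l : List Int) : Int :=
  (l.countP (fun x => decide ((l.count x : Int) ≤ s)) : Int)

theorem countItemsA_eq (items : List Int) (s : Int) :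
    countItemsA items s = cnt s items := by
  unfold countItemsA cnt
  simp [PySem.Dict.getD_counter, List.countP_eq_length_filter]

theorem if_gt_eq_max (b a : Int) : (if a > b then a else b) = max b a := by
  omega

-- countP under a predicate changed only at y
theorem countP_change_at (l : List Int) (y : Int) (p p' : Int → Bool)
    (h : ∀ x, x ≠ y → p' x = p x) :
    ((l.countP p' : Int))
      = (l.countP p : Int)
        + (l.count y : Int) * ((if p' y then 1 else 0) - (if p y then 1 else 0)) := by
  induction l with
  | nil => simp
  | cons z l ih =>
    simp only [List.countP_cons, List.count_cons]
    push_cast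
    rw [ih]
    by_cases hz : z = y
    · subst hz
      simp only [beq_self_eq_true, if_true]
      split_ifs <;> ring
    · have hbz : (z == y) = false := by simp [hz]
      rw [h z hz, hbz]
      simp only [Bool.false_eq_true, if_false]
      ring

theorem cnt_append_singleton (s : Int) (l : List Int) (y : Int) :
    cnt s (l ++ [y])
      = (if (l.count y : Int) + 1 ≤ s then cnt s l + 1
         else if (l.count y : Int) + 1 = s + 1 then cnt s l - s else cnt s l) := by
  have hcount : ∀ x : Int, ((l ++ [y]).count x : Int)
      = (l.count x : Int) + (if x = y then 1 else 0) := by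
    intro x
    rw [List.count_append]
    by_cases hx : x = y <;> simp [hx, List.count_eq_zero]
  unfold cnt
  rw [List.countP_append]
  push_cast
  have hrw : l.countP (fun x => decide (((l ++ [y]).count x : Int) ≤ s))
      = l.countP (fun x => decide ((((l.count x : Int)) + (if x = y then 1 else 0)) ≤ s)) := by
    apply List.countP_congr
    intro x _
    simp only [decide_eq_true_eq]
    rw [hcount x]
  rw [hrw]
  have h := countP_change_at l y
      (fun x => decide ((l.count x : Int) ≤ s))
      (fun x => decide ((((l.count x : Int)) + (if x = y then 1 else 0)) ≤ s))
      (by intro x hx; simp [hx])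
  rw [h]
  simp only [List.countP_singleton, hcount y]
  push_cast
  split_ifs <;> simp_all <;> omega

-- the list of per-prefix counts A computes for right ends inside `rest`
def prefVals (s : Int) (p rest : List Int) : List Int :=
  (List.range rest.length).map (fun k => cnt s (p ++ rest.take (k + 1)))

theorem prefVals_cons (s : Int) (p : List Int) (y : Int) (rest : List Int) :
    prefVals s p (y :: rest) = cnt s (p ++ [y]) :: prefVals s (p ++ [y]) rest := by
  unfold prefVals
  simp [List.range_succ_eq_map, List.map_map, Function.comp_def, List.append_assoc]

-- invariant of B's inner loop
theorem inner_fold (s : Int) (rest : List Int) :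
    ∀ (p : List Int) (d : PySem.Dict Int Int) (best : Int),
      (∀ x, d.getD x 0 = (p.count x : Int)) →
      ((rest.foldl (innerStepB s) (d, cnt s p, best)).2.2)
        = (prefVals s p rest).foldl max best := by
  induction rest with
  | nil => intro p d best _; simp [prefVals]
  | cons y rest ih =>
    intro p d best hd
    rw [prefVals_cons]
    simp only [List.foldl_cons]
    have hstep : innerStepB s (d, cnt s p, best) y
        = (d.insert y (d.getD y 0 + 1), cnt s (p ++ [y]), max best (cnt s (p ++ [y]))) := by
      simp only [innerStepB, hd y, if_gt_eq_max, cnt_append_singleton]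
    rw [hstep]
    exact ih (p ++ [y]) _ (max best (cnt s (p ++ [y])))
      (by
        intro x
        rw [PySem.Dict.getD_insert, hd y, hd x]
        by_cases hx : x = y <;> simp [hx, List.count_append, List.count_eq_zero])

-- folding max over a flatMap = nested folds
theorem foldl_max_flatMap (g : Int → List Int) (as : List Int) (b0 : Int) :
    as.foldl (fun best a => (g a).foldl max best) b0
      = (as.flatMap g).foldl max b0 := by
  induction as generalizing b0 with
  | nil => rfl
  | cons a as ih => simp [List.flatMap_cons, List.foldl_append, ih]

theorem cnt_nonneg (s : Int) (l : List Int) : 0 ≤ cnt s l := by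
  unfold cnt; positivity

theorem cnt_nil (s : Int) : cnt s [] = 0 := by simp [cnt]

-- A's per-a value list equals prefVals over the dropped list
theorem a_inner_eq (souvenirs : List Int) (s : Int) (a : Int) (ha : 0 ≤ a) :
    (PySem.List.pyRange a (souvenirs.length : Int) 1).map (fun b =>
        countItemsA (PySem.List.slice souvenirs (some a) (some (b + 1))) s)
      = prefVals s [] (souvenirs.drop a.toNat) := by
  rw [PySem.List.pyRange_one]
  unfold prefVals
  have hlen : (souvenirs.drop a.toNat).length = ((souvenirs.length : Int) - a).toNat := by
    simp only [List.length_drop]; omega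
  rw [hlen, List.map_map]
  apply List.map_congr_left
  intro k hk
  simp only [Function.comp_apply, List.nil_append]
  rw [countItemsA_eq]
  congr 1
  rw [PySem.List.slice_toNat _ ha (by omega)]
  congr 1
  omega

theorem main_eq (souvenirs : List Int) (s : Int) (h : souvenirs ≠ []) :
    home_coming souvenirs s = home_coming_alt souvenirs s := by
  simp only [home_coming, home_coming_alt]
  set n : Int := (souvenirs.length : Int) with hn
  have hn0 : 0 < n := by
    rw [hn]
    have : souvenirs.length ≠ 0 := fun hc => h (List.eq_nil_of_length_eq_zero hc)
    omega
  set g : Int → List Int := fun a => prefVals s [] (souvenirs.drop a.toNat) with hg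
  -- A's value list is the flatMap of g
  have hLg : (PySem.List.pyRange 0 n 1).flatMap (fun a =>
      (PySem.List.pyRange a n 1).map (fun b =>
        countItemsA (PySem.List.slice souvenirs (some a) (some (b + 1))) s))
      = (PySem.List.pyRange 0 n 1).flatMap g := by
    rw [List.flatMap_def, List.flatMap_def]
    congr 1
    apply List.map_congr_left
    intro a hamem
    have ha : 0 ≤ a := ((PySem.List.mem_pyRange_one).1 hamem).1
    exact a_inner_eq souvenirs s a ha
  rw [hLg]
  set L := (PySem.List.pyRange 0 n 1).flatMap g with hLdef
  -- B's side equals foldl max 0 L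
  have hB : (PySem.List.pyRange 0 n 1).foldl (fun best a =>
      ((PySem.List.slice souvenirs (some a) none).foldl (innerStepB s)
        (PySem.Dict.empty, 0, best)).2.2) 0 = L.foldl max 0 := by
    rw [hLdef, ← foldl_max_flatMap]
    apply PySem.List.foldl_congr_mem
    intro best a hamem
    have ha : 0 ≤ a := ((PySem.List.mem_pyRange_one).1 hamem).1
    rw [PySem.List.slice_from _ ha]
    have h0 : (0 : Int) = cnt s [] := (cnt_nil s).symm
    rw [h0]
    rw [inner_fold s (souvenirs.drop a.toNat) [] PySem.Dict.empty best
      (by intro x; simp [PySem.Dict.getD_empty])]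
  rw [hB]
  -- every element of L is nonnegative
  have hpos : ∀ y ∈ L, 0 ≤ y := by
    intro y hy
    rw [hLdef, List.mem_flatMap] at hy
    obtain ⟨a, _, hy⟩ := hy
    rw [hg] at hy
    unfold prefVals at hy
    rw [List.mem_map] at hy
    obtain ⟨k, _, hk⟩ := hy
    rw [← hk]
    exact cnt_nonneg _ _
  -- L is nonempty
  have hLne : L ≠ [] := by
    rw [hLdef]
    intro hc
    rw [List.flatMap_eq_nil_iff] at hc
    have h0mem : (0 : Int) ∈ PySem.List.pyRange 0 n 1 := by
      rw [PySem.List.mem_pyRange_one]; omega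
    have := hc 0 h0mem
    rw [hg] at this
    unfold prefVals at this
    rw [List.map_eq_nil_iff, List.range_eq_nil] at this
    simp only [Int.toNat_zero, List.drop_zero] at this
    exact h (List.eq_nil_of_length_eq_zero this)
  obtain ⟨m, hm⟩ : ∃ m, PySem.List.max? L id = some m := by
    cases hmx : PySem.List.max? L (id : Int → Int) with
    | none => exact absurd ((PySem.List.max?_eq_none_iff L id).1 hmx) hLne
    | some m => exact ⟨m, rfl⟩
  rw [hm]
  show m = List.foldl max 0 L
  have hmem := PySem.List.max?_mem hm
  have hismax := PySem.List.max?_isMax hm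
  have hfold := PySem.List.le_foldl_max L 0
  have hfoldmem := PySem.List.foldl_max_mem L 0
  apply le_antisymm
  · exact hfold.2 m hmem
  · rcases hfoldmem with h0 | hin
    · rw [h0]; exact hpos m hmem
    · exact hismax _ hin

-- ===== VERDICT (by name: the statement is the Claim_ definition above) =====
theorem home_coming_spec : Claim_equal_home_coming := by
  intro souvenirs s _ hpre
  unfold Spec_home_coming
  exact main_eq souvenirs s hpre
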